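-- pv_equiv track=rewrite | github.com/johanneshoess/proggen | py/kram/onlinetest/rumdreh.py | ersetze
-- ===== SOURCE A (Python) =====
-- def ersetze(zk, dic): # mit replace gehts besser
--     temp = ""
--     on = False
--     ret = ""
--     for e in zk:
--         if not on and e == "{":
--             on = True
--             continue
--         if on and e == "}":
--             on = False
--             ret = ret + dic[temp]
--             temp = ""
--             continue
--         if not on:
--             ret = ret + e
--         if on:
--             temp = temp + e
--     return ret
-- ===== SOURCE B (Python) =====
-- def ersetze(zk, dic):
--     # chunk scanner: cut at '{' / '}' with str.partition instead of a per-char state machine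
--     out = []
--     rest = zk
--     while True:
--         pre, sep, rest = rest.partition('{')
--         out.append(pre)
--         if not sep:
--             break
--         key, sep, rest = rest.partition('}')
--         if not sep:
--             break
--         out.append(dic[key])
--     return ''.join(out)
-- ===== Notes on version B (the rewrite author's own statement) =====
-- stated objective: alternative
-- what changed: Replaced the per-character boolean state machine with a chunk scanner that repeatedly cuts the string at the next '{' and '}' via str.partition and emits whole pieces, joining them at the end.
-- outside the precondition, e.g. on ersetze('{x}', {}): A raises KeyError, B raises KeyError
import Mathlib
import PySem

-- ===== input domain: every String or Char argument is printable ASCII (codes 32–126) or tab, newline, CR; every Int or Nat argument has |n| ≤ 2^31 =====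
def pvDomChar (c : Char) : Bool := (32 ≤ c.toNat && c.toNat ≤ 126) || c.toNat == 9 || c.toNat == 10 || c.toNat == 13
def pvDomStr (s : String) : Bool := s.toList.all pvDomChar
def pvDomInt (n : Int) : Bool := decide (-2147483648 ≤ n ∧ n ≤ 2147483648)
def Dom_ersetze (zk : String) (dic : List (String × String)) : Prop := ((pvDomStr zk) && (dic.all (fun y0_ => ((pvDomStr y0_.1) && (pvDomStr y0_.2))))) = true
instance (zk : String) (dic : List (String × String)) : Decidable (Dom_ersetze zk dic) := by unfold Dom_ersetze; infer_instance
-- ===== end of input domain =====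

-- B replaces A's per-character boolean state machine by a chunk scanner that cuts the
-- string at the next '{' / '}' and emits whole pieces (objective: alternative decomposition).

-- first-match association-list lookup (Python dict[key]); "" stands for the KeyError case,
-- which Pre_ersetze excludes
def pvLookup (dic : List (String × String)) (k : List Char) : List Char :=
  (((dic.find? (fun p => p.1 == String.mk k)).map (·.2)).getD "").toList

-- ===== PORT A =====
-- one step of A's for-loop; state = (temp, on, ret) over List Char
def stepE (dic : List (String × String)) : (List Char × Bool × List Char) → Char → (List Char × Bool × List Char)
  | (temp, on, ret), e =>
    if on = false ∧ e = '{' then (temp, true, ret)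
    else if on = true ∧ e = '}' then ([], false, ret ++ pvLookup dic temp)
    else if on = false then (temp, on, ret ++ [e])
    else (temp ++ [e], on, ret)

def ersetze (zk : String) (dic : List (String × String)) : String :=
  String.mk (zk.toList.foldl (stepE dic) ([], false, [])).2.2

-- ===== PORT B =====
-- Source B's loop: rest.partition('{') = (takeWhile (≠'{'), sep, rest after); likewise for '}'.
-- partition is ported by hand (exact for a single-char separator): the match on dropWhile
-- plays the role of 'if not sep: break'.
def altGo (dic : List (String × String)) (rest acc : List Char) : List Char :=
  let pre := rest.takeWhile (· ≠ '{')
  match h : rest.dropWhile (· ≠ '{') with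
  | [] => acc ++ pre
  | _ :: r =>
    match h2 : r.dropWhile (· ≠ '}') with
    | [] => acc ++ pre
    | _ :: r2 => altGo dic r2 (acc ++ pre ++ pvLookup dic (r.takeWhile (· ≠ '}')))
termination_by rest.length
decreasing_by
  have hr : r.length + 1 ≤ rest.length := by
    have := List.length_dropWhile_le (p := (· ≠ '{')) (l := rest)
    rw [h] at this; simpa using this
  have hr2 : r2.length + 1 ≤ r.length := by
    have := List.length_dropWhile_le (p := (· ≠ '}')) (l := r)
    rw [h2] at this; simpa using this
  omega

def ersetze_alt (zk : String) (dic : List (String × String)) : String :=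
  String.mk (altGo dic zk.toList [])

-- ===== PRECONDITION & SPEC =====
-- input shape for Pre_: the brace-delimited segments of zk (the text between each '{' and
-- the next '}'); a trailing unclosed '{…' contributes no segment
def keysOf (cs : List Char) : List (List Char) :=
  (cs.foldl
    (fun (st : Option (List Char) × List (List Char)) c =>
      match st with
      | (none, ks) => if c = '{' then (some [], ks) else (none, ks)
      | (some t, ks) => if c = '}' then (none, ks ++ [t]) else (some (t ++ [c]), ks))
    (none, [])).2

-- Pre_ excludes exactly the inputs where Python A raises KeyError: some looked-up key is absent
def Pre_ersetze (zk : String) (dic : List (String × String)) : Prop :=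
  ∀ k ∈ keysOf zk.toList, (dic.find? (fun p => p.1 == String.mk k)).isSome = true
instance (zk : String) (dic : List (String × String)) : Decidable (Pre_ersetze zk dic) := by unfold Pre_ersetze; infer_instance

def pvWitness_ersetze : String × (List (String × String)) := ("a{k}b{}c", [("k", "V"), ("", "E")])

def Spec_ersetze (zk : String) (dic : List (String × String)) (out : String) : Prop := out = ersetze_alt zk dic
instance (zk : String) (dic : List (String × String)) (out : String) : Decidable (Spec_ersetze zk dic out) := by unfold Spec_ersetze; infer_instance

-- ===== CLAIM (what is proved, stated in full; the proofs are below) =====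
def Claim_equal_ersetze : Prop := ∀ (zk : String) (dic : List (String × String)), Dom_ersetze zk dic → Pre_ersetze zk dic → Spec_ersetze zk dic (ersetze zk dic)

-- ===== LEMMAS AND PROOFS =====

-- while on = false, characters ≠ '{' are appended to ret one by one
theorem foldl_off (dic : List (String × String)) (pre : List Char) (hp : ∀ c ∈ pre, c ≠ '{') :
    ∀ (temp ret : List Char), pre.foldl (stepE dic) (temp, false, ret) = (temp, false, ret ++ pre) := by
  induction pre with
  | nil => intro temp ret; simp
  | cons c cs ih =>
    intro temp ret
    have hc : c ≠ '{' := hp c (by simp)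
    have hcs : ∀ x ∈ cs, x ≠ '{' := fun x hx => hp x (by simp [hx])
    rw [List.foldl_cons,
      show stepE dic (temp, false, ret) c = (temp, false, ret ++ [c]) from by simp [stepE, hc],
      ih hcs]
    simp

-- while on = true, characters ≠ '}' are appended to temp one by one
theorem foldl_on (dic : List (String × String)) (key : List Char) (hp : ∀ c ∈ key, c ≠ '}') :
    ∀ (temp ret : List Char), key.foldl (stepE dic) (temp, true, ret) = (temp ++ key, true, ret) := by
  induction key with
  | nil => intro temp ret; simp
  | cons c cs ih =>
    intro temp ret
    have hc : c ≠ '}' := hp c (by simp)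
    have hcs : ∀ x ∈ cs, x ≠ '}' := fun x hx => hp x (by simp [hx])
    rw [List.foldl_cons,
      show stepE dic (temp, true, ret) c = (temp ++ [c], true, ret) from by simp [stepE, hc],
      ih hcs]
    simp

-- the head of dropWhile fails the predicate
theorem dropWhile_head_false (p : Char → Bool) :
    ∀ (l r : List Char) (c : Char), l.dropWhile p = c :: r → p c = false := by
  intro l
  induction l with
  | nil => simp
  | cons a as ih =>
    intro r c h
    by_cases hp : p a
    · rw [List.dropWhile_cons_of_pos hp] at h; exact ih _ _ h
    · rw [List.dropWhile_cons_of_neg hp] at h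
      cases h; simpa using hp

theorem takeWhile_ne {b : Char} {l : List Char} :
    ∀ x ∈ l.takeWhile (fun x => decide (x ≠ b)), x ≠ b := by
  intro x hx
  simpa using List.mem_takeWhile_imp hx

theorem main_agree (dic : List (String × String)) :
    ∀ (cs ret : List Char), ((cs.foldl (stepE dic) ([], false, ret)).2.2) = altGo dic cs ret := by
  intro cs ret
  induction cs, ret using altGo.induct (dic := dic) with
  | case1 rest acc h =>
    have hsplit := List.takeWhile_append_dropWhile (p := fun x => decide (x ≠ '{')) (l := rest)
    rw [h] at hsplit
    conv_lhs => rw [← hsplit]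
    rw [List.append_nil, foldl_off dic _ takeWhile_ne [] acc]
    rw [altGo]
    split
    · rfl
    · rename_i heq
      exact absurd (h.symm.trans heq) (by simp)
  | case2 rest acc c r h h2 =>
    have hc : c = '{' := by simpa using dropWhile_head_false _ _ _ _ h
    have hsplit := List.takeWhile_append_dropWhile (p := fun x => decide (x ≠ '{')) (l := rest)
    rw [h] at hsplit
    conv_lhs => rw [← hsplit]
    rw [List.foldl_append, foldl_off dic _ takeWhile_ne [] acc,
      List.foldl_cons,
      show stepE dic ([], false, acc ++ rest.takeWhile (fun x => decide (x ≠ '{'))) c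
          = ([], true, acc ++ rest.takeWhile (fun x => decide (x ≠ '{'))) from by simp [stepE, hc]]
    have hr := List.takeWhile_append_dropWhile (p := fun x => decide (x ≠ '}')) (l := r)
    rw [h2, List.append_nil] at hr
    conv_lhs => rw [← hr]
    rw [foldl_on dic _ takeWhile_ne [] _]
    rw [altGo]
    split
    · rename_i heq
      exact absurd (h.symm.trans heq) (by simp)
    · rename_i c' r' heq
      rw [h] at heq
      obtain ⟨rfl, rfl⟩ : c = c' ∧ r = r' := by simpa using heq
      split
      · rfl
      · rename_i heq2
        exact absurd (h2.symm.trans heq2) (by simp)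
  | case3 rest acc pre c r h c2 r2 h2 ih =>
    have hc : c = '{' := by simpa using dropWhile_head_false _ _ _ _ h
    have hc2 : c2 = '}' := by simpa using dropWhile_head_false _ _ _ _ h2
    have hsplit := List.takeWhile_append_dropWhile (p := fun x => decide (x ≠ '{')) (l := rest)
    rw [h] at hsplit
    conv_lhs => rw [← hsplit]
    rw [List.foldl_append, foldl_off dic _ takeWhile_ne [] acc,
      List.foldl_cons,
      show stepE dic ([], false, acc ++ rest.takeWhile (fun x => decide (x ≠ '{'))) c
          = ([], true, acc ++ rest.takeWhile (fun x => decide (x ≠ '{'))) from by simp [stepE, hc]]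
    have hr := List.takeWhile_append_dropWhile (p := fun x => decide (x ≠ '}')) (l := r)
    rw [h2] at hr
    conv_lhs => rw [← hr]
    rw [List.foldl_append, foldl_on dic _ takeWhile_ne [] _,
      List.nil_append, List.foldl_cons,
      show stepE dic (r.takeWhile (fun x => decide (x ≠ '}')), true,
            acc ++ rest.takeWhile (fun x => decide (x ≠ '{'))) c2
          = ([], false, acc ++ rest.takeWhile (fun x => decide (x ≠ '{'))
              ++ pvLookup dic (r.takeWhile (fun x => decide (x ≠ '}')))) from by simp [stepE, hc2]]
    rw [ih]
    conv_rhs => rw [altGo]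
    split
    · rename_i heq
      exact absurd (h.symm.trans heq) (by simp)
    · rename_i c' r' heq
      rw [h] at heq
      obtain ⟨rfl, rfl⟩ : c = c' ∧ r = r' := by simpa using heq
      split
      · rename_i heq2
        exact absurd (h2.symm.trans heq2) (by simp)
      · rename_i c2' r2' heq2
        rw [h2] at heq2
        obtain ⟨rfl, rfl⟩ : c2 = c2' ∧ r2 = r2' := by simpa using heq2
        rfl

-- ===== VERDICT (by name: the statement is the Claim_ definition above) =====
theorem ersetze_spec : Claim_equal_ersetze := by
  intro zk dic _ _
  unfold Spec_ersetze ersetze ersetze_alt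
  rw [main_agree]
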